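-- pv_equiv track=rewrite | github.com/DataBiosphere/meta-disco | src/meta_disco/validators/read_name_parsers.py | infer_illumina_instrument_model
-- ===== SOURCE A (Python) =====
-- ILLUMINA_INSTRUMENT_RULES = [
--     {"prefix": "A0", "model": "NovaSeq 6000"},
--     {"prefix": "A1", "model": "NovaSeq 6000"},
--     {"prefix": "A", "model": "NovaSeq"},
--     {"prefix": "M", "model": "MiSeq"},
--     {"prefix": "D", "model": "HiSeq 2500"},
--     {"prefix": "E", "model": "HiSeq X"},
--     {"prefix": "VH", "model": "NextSeq 2000"},
--     {"prefix": "N", "model": "NextSeq"},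
--     {"prefix": "K", "model": "HiSeq 4000"},
--     {"prefix": "J", "model": "HiSeq 3000"},
-- ]
--
-- def infer_illumina_instrument_model(instrument_id: str) -> str | None:
--     """
--     Infer Illumina instrument model from instrument ID prefix.
--
--     Uses ILLUMINA_INSTRUMENT_RULES for prefix matching.
--     Order matters: more specific prefixes are checked first.
--
--     Args:
--         instrument_id: The instrument identifier (e.g., "A00297")
--
--     Returns:
--         Instrument model name or None if unknown
--     """
--     if not instrument_id:
--         return None
--
--     inst = instrument_id.upper()
--
--     for rule in ILLUMINA_INSTRUMENT_RULES:
--         if inst.startswith(rule["prefix"]):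
--             return rule["model"]
--
--     return None
-- ===== SOURCE B (Python) =====
-- _TWO_CHAR = {"A0": "NovaSeq 6000", "A1": "NovaSeq 6000", "VH": "NextSeq 2000"}
-- _ONE_CHAR = {
--     "A": "NovaSeq",
--     "M": "MiSeq",
--     "D": "HiSeq 2500",
--     "E": "HiSeq X",
--     "N": "NextSeq",
--     "K": "HiSeq 4000",
--     "J": "HiSeq 3000",
-- }
--
-- def infer_illumina_instrument_model(instrument_id: str) -> str | None:
--     if not instrument_id:
--         return None
--     inst = instrument_id.upper()
--     hit = _TWO_CHAR.get(inst[:2])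
--     if hit is not None:
--         return hit
--     return _ONE_CHAR.get(inst[:1])
-- ===== Notes on version B (the rewrite author's own statement) =====
-- stated objective: idiomatic
-- what changed: Replaced the ordered rule-list scan with prefix startswith tests by two keyed dict lookups: probe a two-char map on inst[:2], then a one-char map on inst[:1].
import Mathlib
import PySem

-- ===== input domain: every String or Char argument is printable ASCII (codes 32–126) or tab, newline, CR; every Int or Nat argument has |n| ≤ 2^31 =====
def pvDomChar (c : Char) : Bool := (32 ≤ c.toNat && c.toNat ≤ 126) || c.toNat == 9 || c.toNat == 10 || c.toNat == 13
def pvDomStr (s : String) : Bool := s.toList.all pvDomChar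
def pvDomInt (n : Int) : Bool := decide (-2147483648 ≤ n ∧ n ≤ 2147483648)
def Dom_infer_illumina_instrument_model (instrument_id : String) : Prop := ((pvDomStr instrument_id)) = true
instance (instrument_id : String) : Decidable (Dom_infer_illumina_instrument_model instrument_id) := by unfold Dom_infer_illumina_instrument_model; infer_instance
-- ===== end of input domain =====

-- B replaces A's ordered rule-list scan by two keyed map lookups (two-char map on inst[:2], then one-char map on inst[:1]); idiomatic, same behaviour.

-- ===== PORT A =====
def pvRules : List (String × String) :=
  [("A0", "NovaSeq 6000"), ("A1", "NovaSeq 6000"), ("A", "NovaSeq"),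
   ("M", "MiSeq"), ("D", "HiSeq 2500"), ("E", "HiSeq X"),
   ("VH", "NextSeq 2000"), ("N", "NextSeq"), ("K", "HiSeq 4000"), ("J", "HiSeq 3000")]

def pvScan (inst : String) : List (String × String) → Option String
  | [] => none
  | (p, m) :: rest => if PySem.Str.startswith inst p then some m else pvScan inst rest

def infer_illumina_instrument_model (instrument_id : String) : Option String :=
  if PySem.Str.len instrument_id = 0 then none
  else pvScan (PySem.Str.upper instrument_id) pvRules

-- ===== PORT B =====
def pvTwoMap : PySem.Dict String String :=
  PySem.Dict.ofList [("A0", "NovaSeq 6000"), ("A1", "NovaSeq 6000"), ("VH", "NextSeq 2000")]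

def pvOneMap : PySem.Dict String String :=
  PySem.Dict.ofList [("A", "NovaSeq"), ("M", "MiSeq"), ("D", "HiSeq 2500"), ("E", "HiSeq X"),
                     ("N", "NextSeq"), ("K", "HiSeq 4000"), ("J", "HiSeq 3000")]

def infer_illumina_instrument_model_alt (instrument_id : String) : Option String :=
  if PySem.Str.len instrument_id = 0 then none
  else
    let inst := PySem.Str.upper instrument_id
    match pvTwoMap.get? (PySem.Str.slice inst none (some 2)) with
    | some m => some m
    | none => pvOneMap.get? (PySem.Str.slice inst none (some 1))

-- ===== PRECONDITION & SPEC =====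
def Spec_infer_illumina_instrument_model (instrument_id : String) (out : Option String) : Prop := out = infer_illumina_instrument_model_alt instrument_id
instance (instrument_id : String) (out : Option String) : Decidable (Spec_infer_illumina_instrument_model instrument_id out) := by unfold Spec_infer_illumina_instrument_model; infer_instance

-- ===== CLAIM (what is proved, stated in full; the proofs are below) =====
def Claim_equal_infer_illumina_instrument_model : Prop := ∀ (instrument_id : String), Dom_infer_illumina_instrument_model instrument_id → Spec_infer_illumina_instrument_model instrument_id (infer_illumina_instrument_model instrument_id)

-- ===== LEMMAS AND PROOFS =====

-- String `==` read through toList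
theorem pvStrBeq (p q : String) : (p == q) = decide (p.toList = q.toList) := by
  rw [Bool.beq_eq_decide_eq]
  exact decide_eq_decide.mpr String.ext_iff

-- the one-character decision chain shared by both sides (A's rules 3–10 / B's one-char map)
def pvOneTree (x : Char) : Option String :=
  if 'A' = x then some "NovaSeq"
  else if 'M' = x then some "MiSeq"
  else if 'D' = x then some "HiSeq 2500"
  else if 'E' = x then some "HiSeq X"
  else if 'N' = x then some "NextSeq"
  else if 'K' = x then some "HiSeq 4000"
  else if 'J' = x then some "HiSeq 3000"
  else none

theorem pvOneMap_get (x : Char) :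
    pvOneMap.get? (String.ofList [x]) = pvOneTree x := by
  rw [show pvOneMap = PySem.Dict.mk [("A", "NovaSeq"), ("M", "MiSeq"), ("D", "HiSeq 2500"),
        ("E", "HiSeq X"), ("N", "NextSeq"), ("K", "HiSeq 4000"), ("J", "HiSeq 3000")] from by decide]
  simp only [PySem.Dict.get?, List.find?, pvStrBeq, String.toList_ofList, pvOneTree]
  by_cases hA : 'A' = x; · subst hA; rfl
  by_cases hM : 'M' = x; · subst hM; rfl
  by_cases hD : 'D' = x; · subst hD; rfl
  by_cases hE : 'E' = x; · subst hE; rfl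
  by_cases hN : 'N' = x; · subst hN; rfl
  by_cases hK : 'K' = x; · subst hK; rfl
  by_cases hJ : 'J' = x; · subst hJ; rfl
  simp [List.cons.injEq, hA, hM, hD, hE, hN, hK, hJ]

theorem pvTwoMap_get (x y : Char) :
    pvTwoMap.get? (String.ofList [x, y]) =
      (if 'A' = x ∧ '0' = y then some "NovaSeq 6000"
       else if 'A' = x ∧ '1' = y then some "NovaSeq 6000"
       else if 'V' = x ∧ 'H' = y then some "NextSeq 2000"
       else none) := by
  rw [show pvTwoMap = PySem.Dict.mk [("A0", "NovaSeq 6000"), ("A1", "NovaSeq 6000"),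
        ("VH", "NextSeq 2000")] from by decide]
  simp only [PySem.Dict.get?, List.find?, pvStrBeq, String.toList_ofList]
  by_cases h0 : 'A' = x ∧ '0' = y
  · obtain ⟨h, h'⟩ := h0; subst h; subst h'; decide
  by_cases h1 : 'A' = x ∧ '1' = y
  · obtain ⟨h, h'⟩ := h1; subst h; subst h'
    rw [if_neg h0, if_pos ⟨rfl, rfl⟩]; decide
  by_cases h2 : 'V' = x ∧ 'H' = y
  · obtain ⟨h, h'⟩ := h2; subst h; subst h'
    rw [if_neg h0, if_neg h1, if_pos ⟨rfl, rfl⟩]; decide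
  simp [List.cons.injEq, h0, h1, h2]

theorem pvTwoMap_get_single (x : Char) :
    pvTwoMap.get? (String.ofList [x]) = none := by
  rw [show pvTwoMap = PySem.Dict.mk [("A0", "NovaSeq 6000"), ("A1", "NovaSeq 6000"),
        ("VH", "NextSeq 2000")] from by decide]
  simp [PySem.Dict.get?, List.find?, pvStrBeq, String.toList_ofList]

-- A's rule scan on a single-character instrument id
theorem pvScan_single (x : Char) :
    pvScan (String.ofList [x]) pvRules = pvOneTree x := by
  simp only [pvScan, pvRules, PySem.Str.startswith, PySem.Chars.startswith,
      String.toList_ofList,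
      show ("A0" : String).toList = ['A','0'] from rfl,
      show ("A1" : String).toList = ['A','1'] from rfl,
      show ("A" : String).toList = ['A'] from rfl,
      show ("M" : String).toList = ['M'] from rfl,
      show ("D" : String).toList = ['D'] from rfl,
      show ("E" : String).toList = ['E'] from rfl,
      show ("VH" : String).toList = ['V','H'] from rfl,
      show ("N" : String).toList = ['N'] from rfl,
      show ("K" : String).toList = ['K'] from rfl,
      show ("J" : String).toList = ['J'] from rfl,
      List.isPrefixOf, Bool.and_false, Bool.and_true, beq_iff_eq,
      Bool.false_eq_true, if_false, pvOneTree]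

-- A's rule scan on an id of length ≥ 2
theorem pvScan_two (x y : Char) (l : List Char) :
    pvScan (String.ofList (x :: y :: l)) pvRules =
      (if 'A' = x ∧ '0' = y then some "NovaSeq 6000"
       else if 'A' = x ∧ '1' = y then some "NovaSeq 6000"
       else if 'V' = x ∧ 'H' = y then some "NextSeq 2000"
       else pvOneTree x) := by
  simp only [pvScan, pvRules, PySem.Str.startswith, PySem.Chars.startswith,
      String.toList_ofList,
      show ("A0" : String).toList = ['A','0'] from rfl,
      show ("A1" : String).toList = ['A','1'] from rfl,
      show ("A" : String).toList = ['A'] from rfl,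
      show ("M" : String).toList = ['M'] from rfl,
      show ("D" : String).toList = ['D'] from rfl,
      show ("E" : String).toList = ['E'] from rfl,
      show ("VH" : String).toList = ['V','H'] from rfl,
      show ("N" : String).toList = ['N'] from rfl,
      show ("K" : String).toList = ['K'] from rfl,
      show ("J" : String).toList = ['J'] from rfl,
      List.isPrefixOf, Bool.and_eq_true, Bool.and_true, beq_iff_eq, pvOneTree]
  by_cases h0 : 'A' = x ∧ '0' = y
  · rw [if_pos h0, if_pos h0]
  by_cases h1 : 'A' = x ∧ '1' = y
  · rw [if_neg h0, if_neg h0, if_pos h1, if_pos h1]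
  by_cases h2 : 'V' = x ∧ 'H' = y
  · have hA : ¬ ('A' = x) := by rintro rfl; exact absurd h2.1 (by decide)
    have hM : ¬ ('M' = x) := by rintro rfl; exact absurd h2.1 (by decide)
    have hD : ¬ ('D' = x) := by rintro rfl; exact absurd h2.1 (by decide)
    have hE : ¬ ('E' = x) := by rintro rfl; exact absurd h2.1 (by decide)
    simp only [if_neg h0, if_neg h1, if_pos h2, if_neg hA, if_neg hM, if_neg hD, if_neg hE]
  · rw [if_neg h0, if_neg h0, if_neg h1, if_neg h1, if_neg h2, if_neg h2]

-- upper of a string, char by char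
theorem pvUpper_toList (s : String) :
    (PySem.Str.upper s).toList = s.toList.map PySem.Chars.upperChar := by
  simp [PySem.Str.upper, PySem.Chars.upper]

-- ===== VERDICT (by name: the statement is the Claim_ definition above) =====
theorem infer_illumina_instrument_model_spec : Claim_equal_infer_illumina_instrument_model := by
  intro s _
  unfold Spec_infer_illumina_instrument_model infer_illumina_instrument_model infer_illumina_instrument_model_alt
  rcases h : s.toList with _ | ⟨a, _ | ⟨b, l⟩⟩
  · have hlen : PySem.Str.len s = 0 := by simp [h]
    rw [if_pos hlen, if_pos hlen]
  · have hlen : ¬ (PySem.Str.len s = 0) := by simp [h]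
    have hu : PySem.Str.upper s = String.ofList [PySem.Chars.upperChar a] := by
      apply String.ext_iff.mpr; rw [pvUpper_toList, h, String.toList_ofList]; simp
    have hs1 : PySem.Str.slice (String.ofList [PySem.Chars.upperChar a]) none (some 1)
        = String.ofList [PySem.Chars.upperChar a] := by
      apply String.ext_iff.mpr; simp [PySem.List.slice_to]
    have hs2 : PySem.Str.slice (String.ofList [PySem.Chars.upperChar a]) none (some 2)
        = String.ofList [PySem.Chars.upperChar a] := by
      apply String.ext_iff.mpr; simp [PySem.List.slice_to]
    rw [if_neg hlen, if_neg hlen]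
    simp only [hu, hs1, hs2, pvTwoMap_get_single, pvScan_single, pvOneMap_get]
  · have hlen : ¬ (PySem.Str.len s = 0) := by simp [h]; omega
    have hu : PySem.Str.upper s =
        String.ofList (PySem.Chars.upperChar a :: PySem.Chars.upperChar b :: l.map PySem.Chars.upperChar) := by
      apply String.ext_iff.mpr; rw [pvUpper_toList, h, String.toList_ofList]; simp
    have hs1 : PySem.Str.slice
        (String.ofList (PySem.Chars.upperChar a :: PySem.Chars.upperChar b :: l.map PySem.Chars.upperChar))
        none (some 1) = String.ofList [PySem.Chars.upperChar a] := by
      apply String.ext_iff.mpr; simp [PySem.List.slice_to]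
    have hs2 : PySem.Str.slice
        (String.ofList (PySem.Chars.upperChar a :: PySem.Chars.upperChar b :: l.map PySem.Chars.upperChar))
        none (some 2) = String.ofList [PySem.Chars.upperChar a, PySem.Chars.upperChar b] := by
      apply String.ext_iff.mpr; simp [PySem.List.slice_to]
    rw [if_neg hlen, if_neg hlen]
    simp only [hu, hs1, hs2, pvTwoMap_get, pvScan_two, pvOneMap_get]
    by_cases g0 : 'A' = PySem.Chars.upperChar a ∧ '0' = PySem.Chars.upperChar b
    · rw [if_pos g0, if_pos g0]
    by_cases g1 : 'A' = PySem.Chars.upperChar a ∧ '1' = PySem.Chars.upperChar b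
    · rw [if_neg g0, if_pos g1, if_neg g0, if_pos g1]
    by_cases g2 : 'V' = PySem.Chars.upperChar a ∧ 'H' = PySem.Chars.upperChar b
    · rw [if_neg g0, if_neg g1, if_pos g2, if_neg g0, if_neg g1, if_pos g2]
    · rw [if_neg g0, if_neg g1, if_neg g2, if_neg g0, if_neg g1, if_neg g2]
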